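-- pv_equiv track=rewrite | github.com/kunalguptamain/SequenceAlignment | non-dp.py | substring_pairs
-- ===== SOURCE A (Python) =====
-- def substring_pairs(sequence_1: str, sequence_2: str):
--     sequence_2_index = 0
--     for i in range(len(sequence_1)):
--         found = False
--         for j in range(sequence_2_index, len(sequence_2)):
--             sequence_2_index = j
--             if(sequence_2[j] == sequence_1[i]):
--                 found = True
--                 break
--         if not found: return False
--     return True
-- ===== SOURCE B (Python) =====
-- def substring_pairs(sequence_1: str, sequence_2: str):
--     # Collapse consecutive duplicate chars of sequence_1 (A may reuse the matched
--     # position, so equal consecutive chars need only one occurrence), then do the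
--     # standard subsequence check by consuming a single iterator over sequence_2.
--     needed = []
--     prev = None
--     for c in sequence_1:
--         if c != prev:
--             needed.append(c)
--             prev = c
--     it = iter(sequence_2)
--     return all(c in it for c in needed)
-- ===== Notes on version B (the rewrite author's own statement) =====
-- stated objective: faster
-- what changed: Replaces A's index-carrying double loop (which rescans from, and may reuse, the matched position) by a two-stage pass: collapse consecutive duplicate characters of sequence_1, then a standard subsequence check consuming one iterator over sequence_2.
import Mathlib
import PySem

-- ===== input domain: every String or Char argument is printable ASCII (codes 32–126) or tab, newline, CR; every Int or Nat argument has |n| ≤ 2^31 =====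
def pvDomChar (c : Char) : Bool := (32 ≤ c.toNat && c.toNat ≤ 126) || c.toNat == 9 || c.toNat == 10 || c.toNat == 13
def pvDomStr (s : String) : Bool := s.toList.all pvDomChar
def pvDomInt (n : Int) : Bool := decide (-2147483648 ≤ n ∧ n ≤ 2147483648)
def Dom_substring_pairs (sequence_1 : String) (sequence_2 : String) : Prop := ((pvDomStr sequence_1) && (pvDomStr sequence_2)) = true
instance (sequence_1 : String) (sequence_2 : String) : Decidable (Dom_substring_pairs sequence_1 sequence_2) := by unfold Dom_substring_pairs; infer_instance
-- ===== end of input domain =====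

-- B collapses consecutive duplicates of sequence_1 and then runs the standard
-- iterator-consuming subsequence check, instead of A's index-carrying double loop
-- that rescans from (and may reuse) the matched position (objective: faster, measured).

-- ===== PORT A =====
-- A's inner loop: scan j upward from k, return the first j with s2[j] = c (none = not found).
def pvFindFrom (s2 : List Char) (c : Char) (j : Nat) : Option Nat :=
  if h : j < s2.length then
    if s2[j] = c then some j else pvFindFrom s2 c (j + 1)
  else none
termination_by s2.length - j

-- A's outer loop over the chars of sequence_1, carrying sequence_2_index.
def pvLoopA (s2 : List Char) : List Char → Nat → Bool
  | [], _ => true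
  | c :: rest, k =>
    match pvFindFrom s2 c k with
    | some j => pvLoopA s2 rest j
    | none => false

def substring_pairs (sequence_1 : String) (sequence_2 : String) : Bool :=
  pvLoopA sequence_2.toList sequence_1.toList 0

-- ===== PORT B =====
-- Source B's first loop: keep each char of sequence_1 that differs from the previous kept one.
def pvDedupGo : Option Char → List Char → List Char
  | _, [] => []
  | prev, c :: rest => if some c = prev then pvDedupGo prev rest else c :: pvDedupGo (some c) rest

-- Source B's `all(c in it for c in needed)`: consume the sequence_2 iterator through each needed char.
def pvIsSub : List Char → List Char → Bool
  | [], _ => true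
  | _ :: _, [] => false
  | c :: cs, d :: ds => if d = c then pvIsSub cs ds else pvIsSub (c :: cs) ds

def substring_pairs_alt (sequence_1 : String) (sequence_2 : String) : Bool :=
  pvIsSub (pvDedupGo none sequence_1.toList) sequence_2.toList

-- ===== PRECONDITION & SPEC =====
def Spec_substring_pairs (sequence_1 : String) (sequence_2 : String) (out : Bool) : Prop := out = substring_pairs_alt sequence_1 sequence_2
instance (sequence_1 : String) (sequence_2 : String) (out : Bool) : Decidable (Spec_substring_pairs sequence_1 sequence_2 out) := by unfold Spec_substring_pairs; infer_instance

-- ===== CLAIM (what is proved, stated in full; the proofs are below) =====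
def Claim_equal_substring_pairs : Prop := ∀ (sequence_1 : String) (sequence_2 : String), Dom_substring_pairs sequence_1 sequence_2 → Spec_substring_pairs sequence_1 sequence_2 (substring_pairs sequence_1 sequence_2)

-- ===== LEMMAS AND PROOFS =====

-- If A's scan from k fails, B's subsequence check on drop k also fails.
theorem pvFindFrom_none (s2 : List Char) (c : Char) (k : Nat)
    (h : pvFindFrom s2 c k = none) (cs : List Char) :
    pvIsSub (c :: cs) (List.drop k s2) = false := by
  unfold pvFindFrom at h
  by_cases hk : k < s2.length
  · rw [List.drop_eq_getElem_cons hk]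
    simp only [hk, dite_true] at h
    by_cases hc : s2[k] = c
    · simp [hc] at h
    · simp only [hc, if_false] at h
      simpa [pvIsSub, hc] using pvFindFrom_none s2 c (k + 1) h cs
  · simp [List.drop_eq_nil_of_le (Nat.le_of_not_lt hk), pvIsSub]
termination_by s2.length - k

-- If A's scan from k finds j, then j is in range, s2[j] = c, and B's check on
-- drop k consumes exactly through j.
theorem pvFindFrom_some (s2 : List Char) (c : Char) (k j : Nat)
    (h : pvFindFrom s2 c k = some j) :
    j < s2.length ∧ s2[j]? = some c ∧
      ∀ cs, pvIsSub (c :: cs) (List.drop k s2) = pvIsSub cs (List.drop (j + 1) s2) := by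
  unfold pvFindFrom at h
  by_cases hk : k < s2.length
  · simp only [hk, dite_true] at h
    by_cases hc : s2[k] = c
    · simp only [hc, if_true, Option.some.injEq] at h
      subst h
      refine ⟨hk, by simp [List.getElem?_eq_getElem hk, hc], ?_⟩
      intro cs
      rw [List.drop_eq_getElem_cons hk]
      simp [pvIsSub, hc]
    · simp only [hc, if_false] at h
      obtain ⟨h1, h2, h3⟩ := pvFindFrom_some s2 c (k + 1) j h
      refine ⟨h1, h2, ?_⟩
      intro cs
      rw [List.drop_eq_getElem_cons hk]
      simp [pvIsSub, hc, h3 cs]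
  · simp [hk] at h
termination_by s2.length - k

-- Main invariant: A standing AT the matched position j (s2[j] = c) equals B having
-- consumed through j, with dedup-prev = c.
theorem pvLoop_inv (s2 : List Char) (rest : List Char) :
    ∀ j c, s2[j]? = some c →
      pvLoopA s2 rest j = pvIsSub (pvDedupGo (some c) rest) (List.drop (j + 1) s2) := by
  induction rest with
  | nil => intro j c _; simp [pvLoopA, pvDedupGo, pvIsSub]
  | cons d rs ih =>
    intro j c hj
    have hjlt : j < s2.length := (List.getElem?_eq_some_iff.mp hj).1
    have hjc : s2[j] = c := by
      have h' := List.getElem?_eq_getElem hjlt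
      rw [h'] at hj
      exact Option.some.inj hj
    by_cases hd : d = c
    · subst hd
      have hfind : pvFindFrom s2 d j = some j := by
        unfold pvFindFrom; simp [hjlt, hjc]
      simp only [pvLoopA, hfind, pvDedupGo]
      exact ih j d hj
    · have hne : ¬ (some d = some c) := by simp [hd]
      -- drop j s2 starts with c ≠ d, so B scanning drop (j+1) equals scanning drop j
      have hdj : List.drop j s2 = c :: List.drop (j + 1) s2 := by
        rw [List.drop_eq_getElem_cons hjlt, hjc]
      have hbridge : ∀ cs, pvIsSub (d :: cs) (List.drop (j + 1) s2)
          = pvIsSub (d :: cs) (List.drop j s2) := by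
        intro cs
        rw [hdj]
        have hcd : ¬ c = d := fun h => hd h.symm
        simp [pvIsSub, hcd]
      simp only [pvLoopA, pvDedupGo, hne, if_false]
      cases hfind : pvFindFrom s2 d j with
      | none =>
        rw [hbridge (pvDedupGo (some d) rs)]
        exact (pvFindFrom_none s2 d j hfind (pvDedupGo (some d) rs)).symm
      | some j' =>
        obtain ⟨h1, h2, h3⟩ := pvFindFrom_some s2 d j j' hfind
        rw [hbridge (pvDedupGo (some d) rs), h3 (pvDedupGo (some d) rs)]
        exact ih j' d h2

theorem pvLoop_top (s2 s1 : List Char) :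
    pvLoopA s2 s1 0 = pvIsSub (pvDedupGo none s1) s2 := by
  cases s1 with
  | nil => simp [pvLoopA, pvDedupGo, pvIsSub]
  | cons c rs =>
    have : pvDedupGo none (c :: rs) = c :: pvDedupGo (some c) rs := by
      simp [pvDedupGo]
    rw [this]
    simp only [pvLoopA]
    cases hfind : pvFindFrom s2 c 0 with
    | none =>
      have := pvFindFrom_none s2 c 0 hfind (pvDedupGo (some c) rs)
      simpa using this.symm
    | some j =>
      obtain ⟨h1, h2, h3⟩ := pvFindFrom_some s2 c 0 j hfind
      have := h3 (pvDedupGo (some c) rs)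
      simp only [List.drop_zero] at this
      rw [this]
      exact pvLoop_inv s2 rs j c h2

-- ===== VERDICT (by name: the statement is the Claim_ definition above) =====
theorem substring_pairs_spec : Claim_equal_substring_pairs := by
  intro s1 s2 _
  unfold Spec_substring_pairs substring_pairs substring_pairs_alt
  exact pvLoop_top s2.toList s1.toList
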